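-- pv_equiv track=rewrite | github.com/andrewkornder/code | school/HW/list_functions.py | splittable
-- ===== SOURCE A (Python) =====
-- def splittable(nums):
--     rval = []
--     if sum(nums) % 2 == 0:
--         goal = sum(nums)/2
--     else:
--         return None
--     for i in range(len(nums)):
--         if sum(nums[:i]) == sum(nums[i:]):
--             return nums[:i], nums[i:]
--     return None
-- ===== SOURCE B (Python) =====
-- def splittable(nums):
--     total = sum(nums)
--     if total % 2:
--         return None
--     left = 0
--     for i, x in enumerate(nums):
--         if 2 * left == total:
--             return nums[:i], nums[i:]
--         left += x
--     return None
-- ===== Notes on version B (the rewrite author's own statement) =====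
-- stated objective: alternative
-- what changed: B computes the total once and maintains a running prefix sum in a single pass (comparing 2*left to total), instead of A re-summing both slices at every split point.
import Mathlib
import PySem

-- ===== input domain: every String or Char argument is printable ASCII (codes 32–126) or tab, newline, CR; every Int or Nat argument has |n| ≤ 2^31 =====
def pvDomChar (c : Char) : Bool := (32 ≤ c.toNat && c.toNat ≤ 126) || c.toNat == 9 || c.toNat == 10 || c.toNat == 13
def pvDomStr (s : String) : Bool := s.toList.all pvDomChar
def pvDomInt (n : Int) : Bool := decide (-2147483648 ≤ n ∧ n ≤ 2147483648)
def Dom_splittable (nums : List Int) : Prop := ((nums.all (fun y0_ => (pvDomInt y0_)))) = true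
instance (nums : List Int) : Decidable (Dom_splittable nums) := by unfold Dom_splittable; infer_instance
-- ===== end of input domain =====

-- B replaces A's re-summing of both slices at each split point by one running prefix sum over the list.
-- ===== PORT A =====
-- for i in range(len(nums)): if sum(nums[:i]) == sum(nums[i:]): return nums[:i], nums[i:]
def splittableLoopA (nums : List Int) (i : Nat) : Option (List Int × List Int) :=
  if i < nums.length then
    if (PySem.List.slice nums none (some (i : Int))).sum == (PySem.List.slice nums (some (i : Int)) none).sum then
      some (PySem.List.slice nums none (some (i : Int)), PySem.List.slice nums (some (i : Int)) none)
    else splittableLoopA nums (i + 1)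
  else none
termination_by nums.length - i

-- A also binds `goal = sum(nums)/2` (a float it never uses); that dead binding is not ported.
def splittable (nums : List Int) : Option (List Int × List Int) :=
  if PySem.Int.mod nums.sum 2 == 0 then splittableLoopA nums 0
  else none

-- ===== PORT B =====
-- for i, x in enumerate(nums): if 2*left == total: return nums[:i], nums[i:]; left += x
def splittableLoopB (nums : List Int) (total : Int) (rest : List Int) (i : Nat) (left : Int) :
    Option (List Int × List Int) :=
  match rest with
  | [] => none
  | x :: xs =>
      if 2 * left == total then
        some (PySem.List.slice nums none (some (i : Int)), PySem.List.slice nums (some (i : Int)) none)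
      else splittableLoopB nums total xs (i + 1) (left + x)

def splittable_alt (nums : List Int) : Option (List Int × List Int) :=
  let total := nums.sum
  if PySem.Int.mod total 2 != 0 then none
  else splittableLoopB nums total nums 0 0

-- ===== PRECONDITION & SPEC =====
def Spec_splittable (nums : List Int) (out : Option (List Int × List Int)) : Prop := out = splittable_alt nums
instance (nums : List Int) (out : Option (List Int × List Int)) : Decidable (Spec_splittable nums out) := by unfold Spec_splittable; infer_instance

-- ===== CLAIM (what is proved, stated in full; the proofs are below) =====
def Claim_equal_splittable : Prop := ∀ (nums : List Int), Dom_splittable nums → Spec_splittable nums (splittable nums)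

-- ===== LEMMAS AND PROOFS =====

-- ===== VERDICT (by name: the statement is the Claim_ definition above) =====
lemma splittable_loop_eq (nums : List Int) :
    ∀ k i, i ≤ nums.length → nums.length - i = k →
      splittableLoopA nums i =
        splittableLoopB nums nums.sum (nums.drop i) i (nums.take i).sum := by
  intro k
  induction k with
  | zero =>
      intro i hi hk
      have h : i = nums.length := by omega
      subst h
      rw [splittableLoopA]
      simp [splittableLoopB, List.drop_length]
  | succ k ih =>
      intro i hi hk
      have hlt : i < nums.length := by omega
      have hdrop : nums.drop i = nums[i] :: nums.drop (i + 1) :=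
        List.drop_eq_getElem_cons hlt
      have hsum : (nums.take i).sum + (nums.drop i).sum = nums.sum := by
        rw [← List.sum_append, List.take_append_drop]
      have htake : (nums.take (i + 1)).sum = (nums.take i).sum + nums[i] := by
        have h1 : nums.take (i + 1) = nums.take i ++ [nums[i]] := by
          rw [List.take_add_one, List.getElem?_eq_getElem hlt]
          rfl
        rw [h1, List.sum_append, List.sum_singleton]
      rw [splittableLoopA, if_pos hlt, hdrop, splittableLoopB]
      simp only [PySem.List.slice_to_natCast, PySem.List.slice_from_natCast, beq_iff_eq]
      by_cases hc : 2 * (nums.take i).sum = nums.sum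
      · have heq : (nums.take i).sum = (nums.drop i).sum := by linarith
        rw [if_pos heq, if_pos hc]
      · have hne : ¬ ((nums.take i).sum = (nums.drop i).sum) := by
          intro h; exact hc (by linarith)
        rw [if_neg hne, if_neg hc, ← htake]
        exact ih (i + 1) (by omega) (by omega)

theorem splittable_spec : Claim_equal_splittable := by
  intro nums _
  unfold Spec_splittable splittable splittable_alt
  have h := splittable_loop_eq nums nums.length 0 (by omega) (by omega)
  simp only [List.drop_zero, List.take_zero, List.sum_nil] at h
  simp only []
  rw [PySem.Int.mod_eq_emod_of_pos (by omega : (0:Int) < 2)]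
  by_cases he : nums.sum % 2 = 0
  · simp [he, h]
  · have h1 : nums.sum % 2 = 1 := by omega
    simp [h1]
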